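-- pv_equiv track=rewrite | github.com/islamcode633/PoE-tests | refact.py | errors_counting
-- ===== SOURCE A (Python) =====
-- from typing import List, Dict, Any
--
-- def errors_counting(ports: List[str]) -> str:
--     """ Counts the number of errors for each port """
--     res: str = ""
--     for uport in sorted(set(ports)):
--         frequent: int = 0
--         for port in ports:
--             if uport == port:
--                 frequent += 1
--         res += f'{uport[-1]}({frequent}) '
--     return res
-- ===== SOURCE B (Python) =====
-- def errors_counting(ports):
--     """ Counts the number of errors for each port """
--     parts = []
--     run = None
--     count = 0
--     for p in sorted(ports):
--         if p == run:
--             count += 1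
--         else:
--             if run is not None:
--                 parts.append(f'{run[-1]}({count}) ')
--             run = p
--             count = 1
--     if run is not None:
--         parts.append(f'{run[-1]}({count}) ')
--     return ''.join(parts)
-- ===== Notes on version B (the rewrite author's own statement) =====
-- stated objective: faster
-- what changed: A builds sorted(set(ports)) and re-scans the whole list to count each unique port; B sorts once and emits run lengths of consecutive equal ports in a single grouped pass.
import Mathlib
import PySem

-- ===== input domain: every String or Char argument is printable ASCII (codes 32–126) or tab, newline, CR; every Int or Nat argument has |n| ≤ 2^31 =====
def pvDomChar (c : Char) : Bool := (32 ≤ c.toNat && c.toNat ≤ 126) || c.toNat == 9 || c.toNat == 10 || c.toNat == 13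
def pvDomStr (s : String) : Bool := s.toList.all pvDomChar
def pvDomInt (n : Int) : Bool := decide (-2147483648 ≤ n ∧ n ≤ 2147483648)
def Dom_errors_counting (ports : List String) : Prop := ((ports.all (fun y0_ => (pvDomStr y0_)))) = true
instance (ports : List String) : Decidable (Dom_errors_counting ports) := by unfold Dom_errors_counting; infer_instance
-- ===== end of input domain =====

-- B replaces A's "unique set + full re-scan per unique value" by one sort followed by a single
-- run-length pass over the sorted list (asymptotically fewer comparisons on many-distinct inputs).

-- f'{u[-1]}({n}) ' — shared semantics of the identical f-string both Pythons contain
-- (the 'none' default is never reached under Pre_: every port is non-empty there).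
def pvFmt (u : String) (n : Int) : String :=
  (match PySem.Str.pyGet? u (-1) with
   | some c => String.ofList [c]
   | none => "") ++ "(" ++ PySem.Int.toStr n ++ ") "

-- ===== PORT A =====
def errors_counting (ports : List String) : String :=
  (PySem.List.sorted (PySem.Set.ofList ports) (fun x => x) false).foldl
    (fun res uport =>
      let frequent : Int :=
        ports.foldl (fun f port => if uport == port then f + 1 else f) 0
      res ++ pvFmt uport frequent) ""

-- ===== PORT B =====
-- the for-loop of Source B: state = (run, count, parts); after the loop, flush the last run
def errors_counting_alt_go : List String → Option String → Int → List String → List String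
  | [], run, count, parts =>
      (match run with
       | some r => parts ++ [pvFmt r count]
       | none => parts)
  | p :: rest, run, count, parts =>
      if some p == run then
        errors_counting_alt_go rest run (count + 1) parts
      else
        (match run with
         | some r => errors_counting_alt_go rest (some p) 1 (parts ++ [pvFmt r count])
         | none => errors_counting_alt_go rest (some p) 1 parts)

def errors_counting_alt (ports : List String) : String :=
  PySem.Str.join ""
    (errors_counting_alt_go (PySem.List.sorted ports (fun x => x) false) none 0 [])

-- ===== PRECONDITION & SPEC =====
-- A raises IndexError on ''[-1] whenever the empty string occurs among the ports (B raises there too).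
def Pre_errors_counting (ports : List String) : Prop := "" ∉ ports
instance (ports : List String) : Decidable (Pre_errors_counting ports) := by
  unfold Pre_errors_counting; infer_instance

def pvWitness_errors_counting : List String := ["80", "443", "80", "8080", "443", "80"]

def Spec_errors_counting (ports : List String) (out : String) : Prop := out = errors_counting_alt ports
instance (ports : List String) (out : String) : Decidable (Spec_errors_counting ports out) := by
  unfold Spec_errors_counting; infer_instance

-- ===== CLAIM (what is proved, stated in full; the proofs are below) =====
def Claim_equal_errors_counting : Prop := ∀ (ports : List String), Dom_errors_counting ports → Pre_errors_counting ports → Spec_errors_counting ports (errors_counting ports)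

-- ===== LEMMAS AND PROOFS =====

-- heads of the runs of consecutive equal elements
def pvRunHeads : List String → List String
  | [] => []
  | p :: t => p :: pvRunHeads (t.dropWhile (· == p))
termination_by s => s.length
decreasing_by
  simpa using Nat.lt_succ_of_le (List.length_dropWhile_le _ _)

-- the list of formatted chunks Source B's loop produces
def pvRunsOut : List String → List String
  | [] => []
  | p :: t => pvFmt p (1 + ((t.takeWhile (· == p)).length : Int)) :: pvRunsOut (t.dropWhile (· == p))
termination_by s => s.length
decreasing_by
  simpa using Nat.lt_succ_of_le (List.length_dropWhile_le _ _)

lemma go_some (s : List String) : ∀ (r : String) (c : Int) (parts : List String),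
    errors_counting_alt_go s (some r) c parts =
      parts ++ [pvFmt r (c + ((s.takeWhile (· == r)).length : Int))] ++ pvRunsOut (s.dropWhile (· == r)) := by
  induction s with
  | nil => intro r c parts; simp [errors_counting_alt_go, pvRunsOut]
  | cons p t ih =>
    intro r c parts
    by_cases h : p = r
    · subst h
      simp only [errors_counting_alt_go, List.takeWhile, List.dropWhile, beq_self_eq_true]
      rw [ih]
      simp only [List.length_cons]
      push_cast
      ring_nf
    · have hb : (p == r) = false := by simp [h]
      simp only [errors_counting_alt_go, List.takeWhile, List.dropWhile, hb]
      rw [if_neg (by simp [h]), ih]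
      simp [pvRunsOut]

lemma go_none (s : List String) :
    errors_counting_alt_go s none 0 [] = pvRunsOut s := by
  cases s with
  | nil => simp [errors_counting_alt_go, pvRunsOut]
  | cons p t =>
    simp only [errors_counting_alt_go]
    rw [if_neg (by simp), go_some]
    simp [pvRunsOut]

lemma mem_runHeads_sub {s : List String} {y : String} (h : y ∈ pvRunHeads s) : y ∈ s := by
  induction s using pvRunHeads.induct with
  | case1 => simp [pvRunHeads] at h
  | case2 p t ih =>
    rw [pvRunHeads] at h
    rcases List.mem_cons.mp h with h | h
    · simp [h]
    · exact List.mem_cons_of_mem _ ((t.dropWhile_sublist (· == p)).mem (ih h))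

lemma dropWhile_gt {p : String} {t : List String}
    (hs : t.Pairwise (· ≤ ·)) (hp : ∀ y ∈ t, p ≤ y) :
    ∀ y ∈ t.dropWhile (· == p), p < y := by
  intro y hy
  rcases hx : t.dropWhile (· == p) with _ | ⟨x, rest⟩
  · simp [hx] at hy
  · have hxmem : x ∈ t := (t.dropWhile_sublist (· == p)).mem (by simp [hx])
    have hxne : x ≠ p := by
      have h := List.head_dropWhile_not (· == p) (l := t) (by simp [hx])
      have h2 : (x == p) = false := by
        simpa [List.head_eq_iff_head?_eq_some, hx] using h
      simpa using h2
    have hpx : p < x := lt_of_le_of_ne (hp x hxmem) (Ne.symm hxne)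
    have hsorted : (t.dropWhile (· == p)).Pairwise (· ≤ ·) :=
      List.Pairwise.sublist (t.dropWhile_sublist (· == p)) hs
    rw [hx] at hy hsorted
    rcases List.mem_cons.mp hy with rfl | hy
    · exact hpx
    · exact lt_of_lt_of_le hpx ((List.pairwise_cons.mp hsorted).1 y hy)

lemma runHeads_mem {s : List String} (hs : s.Pairwise (· ≤ ·)) {y : String} (hy : y ∈ s) :
    y ∈ pvRunHeads s := by
  induction s using pvRunHeads.induct with
  | case1 => simp at hy
  | case2 p t ih =>
    rw [pvRunHeads]
    rcases List.mem_cons.mp hy with rfl | hy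
    · exact List.mem_cons_self
    · by_cases hyp : y = p
      · simp [hyp]
      · have hsplit := List.takeWhile_append_dropWhile (p := (· == p)) (l := t)
        have : y ∈ t.takeWhile (· == p) ∨ y ∈ t.dropWhile (· == p) := by
          rw [← List.mem_append, hsplit]; exact hy
        rcases this with h | h
        · exact absurd (by simpa using List.mem_takeWhile_imp h) hyp
        · exact List.mem_cons_of_mem _
            (ih (List.Pairwise.sublist (t.dropWhile_sublist (· == p)) (List.pairwise_cons.mp hs).2) h)

lemma runHeads_pairwise_lt {s : List String} (hs : s.Pairwise (· ≤ ·)) :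
    (pvRunHeads s).Pairwise (· < ·) := by
  induction s using pvRunHeads.induct with
  | case1 => simp [pvRunHeads]
  | case2 p t ih =>
    obtain ⟨hle, ht⟩ := List.pairwise_cons.mp hs
    rw [pvRunHeads]
    refine List.pairwise_cons.mpr ⟨?_, ih (List.Pairwise.sublist (t.dropWhile_sublist (· == p)) ht)⟩
    intro y hy
    exact dropWhile_gt ht hle y (mem_runHeads_sub hy)

lemma count_head {p : String} {t : List String}
    (hs : (p :: t).Pairwise (· ≤ ·)) :
    ((p :: t).count p : Int) = 1 + ((t.takeWhile (· == p)).length : Int) := by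
  obtain ⟨hle, ht⟩ := List.pairwise_cons.mp hs
  have hsplit := List.takeWhile_append_dropWhile (p := (· == p)) (l := t)
  have h1 : (t.takeWhile (· == p)).count p = (t.takeWhile (· == p)).length :=
    List.count_eq_length.mpr (fun y hy => by
      have h := List.mem_takeWhile_imp (p := (· == p)) (l := t) hy
      exact (beq_iff_eq.mp h).symm)
  have h2 : (t.dropWhile (· == p)).count p = 0 :=
    List.count_eq_zero.mpr (fun hmem => absurd rfl (ne_of_gt (dropWhile_gt ht hle p hmem)))
  have hcnt : t.count p = (t.takeWhile (· == p)).length := by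
    conv_lhs => rw [← hsplit]
    rw [List.count_append, h1, h2]
    omega
  rw [List.count_cons_self, hcnt]
  push_cast
  ring

lemma count_later {p q : String} {t : List String}
    (hs : (p :: t).Pairwise (· ≤ ·)) (hq : q ∈ pvRunHeads (t.dropWhile (· == p))) :
    (p :: t).count q = (t.dropWhile (· == p)).count q := by
  obtain ⟨hle, ht⟩ := List.pairwise_cons.mp hs
  have hgt : p < q := dropWhile_gt ht hle q (mem_runHeads_sub hq)
  have hqp : q ≠ p := ne_of_gt hgt
  have hsplit := List.takeWhile_append_dropWhile (p := (· == p)) (l := t)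
  have h1 : (t.takeWhile (· == p)).count q = 0 :=
    List.count_eq_zero.mpr (fun hmem => hqp (by simpa using List.mem_takeWhile_imp hmem))
  have hstep : (p :: t).count q = t.count q := by
    simp [Ne.symm hqp]
  rw [hstep]
  conv_lhs => rw [← hsplit]
  rw [List.count_append, h1, Nat.zero_add]

lemma runsOut_eq {s : List String} (hs : s.Pairwise (· ≤ ·)) :
    pvRunsOut s = (pvRunHeads s).map (fun p => pvFmt p ((s.count p : Int))) := by
  induction s using pvRunsOut.induct with
  | case1 => unfold pvRunsOut pvRunHeads; rfl
  | case2 p t ih =>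
    obtain ⟨hle, ht⟩ := List.pairwise_cons.mp hs
    have hdw : (t.dropWhile (· == p)).Pairwise (· ≤ ·) :=
      List.Pairwise.sublist (t.dropWhile_sublist (· == p)) ht
    rw [pvRunsOut, pvRunHeads, List.map_cons, ← count_head hs, ih hdw]
    congr 1
    exact (List.map_congr_left (fun q hq => by rw [count_later hs hq])).symm

-- Chars.join with the empty separator is flatten
lemma join_empty (L : List (List Char)) : PySem.Chars.join ("".toList) L = L.flatten := by
  rw [String.toList_empty]
  induction L with
  | nil => simp [PySem.Chars.join_nil]
  | cons a L ih =>
    cases L with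
    | nil => simp [PySem.Chars.join_singleton]
    | cons b rest => rw [PySem.Chars.join_cons_cons, ih]; simp

-- A's outer loop is the concatenation of the formatted chunks
lemma foldl_append_chunks (l : List String) (g : String → String) :
    ∀ acc : String, l.foldl (fun res u => res ++ g u) acc =
      String.ofList (acc.toList ++ ((l.map g).map String.toList).flatten) := by
  induction l with
  | nil => intro acc; simp [String.ofList_toList]
  | cons x t ih =>
    intro acc
    rw [List.foldl_cons, ih]
    simp [String.toList_append]

lemma runHeads_eq_sorted_set {ports : List String} :
    pvRunHeads (PySem.List.sorted ports (fun x => x) false) =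
      PySem.List.sorted (PySem.Set.ofList ports) (fun x => x) false := by
  have hperm := PySem.List.sorted_perm ports (fun x => x) false
  have hs : (PySem.List.sorted ports (fun x => x) false).Pairwise (· ≤ ·) :=
    PySem.List.sorted_pairwise ports (fun x => x)
  refine (PySem.List.sorted_eq_of_perm_of_pairwise_lt _ _ _ ?_ (runHeads_pairwise_lt hs)).symm
  refine List.perm_of_nodup_nodup_toFinset_eq
    ((runHeads_pairwise_lt hs).imp ne_of_lt) (PySem.Set.nodup_ofList ports) ?_
  ext y
  simp only [List.mem_toFinset, PySem.Set.mem_ofList]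
  constructor
  · intro h; exact hperm.mem_iff.mp (mem_runHeads_sub h)
  · intro h; exact runHeads_mem hs (hperm.mem_iff.mpr h)

lemma count_eq_inner_loop (ports : List String) (p : String) :
    ((PySem.List.sorted ports (fun x => x) false).count p : Int) =
      ports.foldl (fun f port => if p == port then f + 1 else f) 0 := by
  rw [PySem.List.foldl_count_if (fun port => p == port) ports 0]
  have h1 : ports.countP (fun port => p == port) = ports.count p := by
    unfold List.count
    exact List.countP_congr (fun x _ => by rw [Bool.beq_comm])
  rw [h1, (PySem.List.sorted_perm ports (fun x => x) false).count_eq p]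
  simp

-- ===== VERDICT (by name: the statement is the Claim_ definition above) =====
theorem errors_counting_spec : Claim_equal_errors_counting := by
  intro ports _ _
  unfold Spec_errors_counting errors_counting errors_counting_alt
  rw [go_none, runsOut_eq (PySem.List.sorted_pairwise ports (fun x => x)),
      runHeads_eq_sorted_set,
      List.map_congr_left (fun p _ => by rw [count_eq_inner_loop ports p])]
  apply String.toList_inj.mp
  rw [foldl_append_chunks, PySem.Str.toList_join, join_empty]
  simp
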